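-- pv_equiv track=rewrite | github.com/Fish-Fan/leetcode_python | interview_q_jerry_2.py | dfs
-- ===== SOURCE A (Python) =====
-- def dfs(v, adj_list, mem):
--     if v in mem:
--         return 0
--
--     # count current city population and mark as visited
--     traffic_v = v
--     mem[v] = True
--
--     # repeatedly search neighbor city and sum their population to current city
--     for nxt in adj_list[v]:
--         traffic_v += dfs(nxt, adj_list, mem)
--     return traffic_v
-- ===== SOURCE B (Python) =====
-- def dfs(v, adj_list, mem):
--     # Iterative DFS with an explicit stack instead of recursion.
--     # Like A, marks visited nodes in `mem` in place; same traversal order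
--     # (neighbors pushed reversed so the first neighbor is popped first).
--     total = 0
--     stack = [v]
--     while stack:
--         node = stack.pop()
--         if node in mem:
--             continue
--         mem[node] = True
--         total += node
--         stack.extend(reversed(adj_list[node]))
--     return total
-- ===== Notes on version B (the rewrite author's own statement) =====
-- stated objective: idiomatic
-- what changed: The recursive DFS is replaced by an iterative DFS with an explicit stack and an accumulator (pop a node, skip if visited, otherwise mark it, add its value, push its neighbors reversed), removing recursion entirely.
import Mathlib
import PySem

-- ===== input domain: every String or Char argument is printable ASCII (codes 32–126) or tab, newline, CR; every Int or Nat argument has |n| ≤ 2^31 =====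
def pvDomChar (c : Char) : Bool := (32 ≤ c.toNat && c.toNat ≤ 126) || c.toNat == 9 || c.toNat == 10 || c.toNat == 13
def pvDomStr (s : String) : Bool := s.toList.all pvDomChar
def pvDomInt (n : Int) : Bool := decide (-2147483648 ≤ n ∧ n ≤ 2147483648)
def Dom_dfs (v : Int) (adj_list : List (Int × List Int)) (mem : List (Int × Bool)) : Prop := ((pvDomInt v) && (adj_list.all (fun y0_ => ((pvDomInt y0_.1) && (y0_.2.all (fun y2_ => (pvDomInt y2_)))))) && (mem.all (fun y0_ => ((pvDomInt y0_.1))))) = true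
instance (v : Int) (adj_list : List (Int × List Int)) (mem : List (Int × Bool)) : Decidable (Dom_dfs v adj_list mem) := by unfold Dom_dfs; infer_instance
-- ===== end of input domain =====

-- B replaces A's recursion by an iterative DFS with an explicit stack (idiomatic, same cost).
-- Both Pythons mutate `mem` identically (same marks); the theorems below are about the return value.

-- ===== PORT A =====
-- A's recursion, with a fuel guard for totality only; `dfs` supplies fuel adj_list.length + 1,
-- which is proved sufficient below (A's recursion depth is bounded by the unvisited keys + 1).
-- The exhaustion branch returns (0, mem) and is never reached at that fuel.
mutual
def dfsA (adj : PySem.Dict Int (List Int)) (fuel : Nat) (v : Int) (mem : PySem.Dict Int Bool) : Int × PySem.Dict Int Bool :=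
  match fuel with
  | 0 => (0, mem)
  | f + 1 =>
    if (PySem.Dict.get? mem v).isSome then (0, mem)
    else
      -- traffic_v = v; mem[v] = True; for nxt in adj_list[v]: traffic_v += dfs(nxt, adj_list, mem)
      -- Python raises KeyError when v is no key of adj_list; Pre_dfs excludes that, getD [] is the guard.
      dfsAList adj f (PySem.Dict.getD adj v []) v (PySem.Dict.insert mem v true)
  termination_by (fuel, 0)

def dfsAList (adj : PySem.Dict Int (List Int)) (fuel : Nat) (ns : List Int) (acc : Int) (mem : PySem.Dict Int Bool) : Int × PySem.Dict Int Bool :=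
  match ns with
  | [] => (acc, mem)
  | n :: rest =>
      let r := dfsA adj fuel n mem
      dfsAList adj fuel rest (acc + r.1) r.2
  termination_by (fuel, ns.length + 1)
end

def dfs (v : Int) (adj_list : List (Int × List Int)) (mem : List (Int × Bool)) : Int :=
  (dfsA (PySem.Dict.mk adj_list) (adj_list.length + 1) v (PySem.Dict.mk mem)).1

-- ===== PORT B =====
-- Source B's while-loop over an explicit stack; the Lean stack keeps the TOP at the HEAD
-- (Python pops from the end and pushes reversed(adj_list[node]), so the head here is the
-- popped node and `ns ++ rest` is extend(reversed(ns))). Fuel guards the while loop only;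
-- dfs_alt supplies total-neighbor-sum + 2, proved sufficient below.
def loopB (adj : PySem.Dict Int (List Int)) (fuel : Nat) (stack : List Int) (mem : PySem.Dict Int Bool) (total : Int) : Int :=
  match fuel, stack with
  | 0, _ => total
  | _ + 1, [] => total
  | f + 1, node :: rest =>
    if (PySem.Dict.get? mem node).isSome then loopB adj f rest mem total
    else loopB adj f (PySem.Dict.getD adj node [] ++ rest) (PySem.Dict.insert mem node true) (total + node)

def dfs_alt (v : Int) (adj_list : List (Int × List Int)) (mem : List (Int × Bool)) : Int :=
  loopB (PySem.Dict.mk adj_list) ((adj_list.map (fun p => p.2.length)).sum + 2) [v] (PySem.Dict.mk mem) 0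

-- ===== PRECONDITION & SPEC =====
-- Saturated neighbor-closure used only by Pre_dfs: the set of nodes reachable from the start
-- node through edges leaving unvisited keys of adj_list (adj_list.length + 2 rounds reach the
-- fixpoint, since each productive round adds a new unvisited key and there are at most
-- adj_list.length of them).
def pvStep (adj : List (Int × List Int)) (memK : List Int) (S : List Int) : List Int :=
  S ++ (((adj.filter (fun p => S.contains p.1 && !(memK.contains p.1))).flatMap (fun p => p.2)).filter (fun m => !(S.contains m)))

def pvReach (adj : List (Int × List Int)) (memK : List Int) : Nat → List Int → List Int
  | 0, S => S
  | k + 1, S => pvReach adj memK k (pvStep adj memK S)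

-- Python A (and Source B alike) raises KeyError exactly when the traversal reaches an unvisited
-- node that is no key of adj_list; Pre_dfs excludes exactly those inputs: every node reachable
-- from v through unvisited keys must be visited or a key. It excludes no input on which A returns.
def Pre_dfs (v : Int) (adj_list : List (Int × List Int)) (mem : List (Int × Bool)) : Prop :=
  ((pvReach adj_list (mem.map Prod.fst) (adj_list.length + 2) [v]).all
    (fun n => (mem.map Prod.fst).contains n || (adj_list.map Prod.fst).contains n)) = true
instance (v : Int) (adj_list : List (Int × List Int)) (mem : List (Int × Bool)) : Decidable (Pre_dfs v adj_list mem) := by unfold Pre_dfs; infer_instance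

def pvWitness_dfs : Int × (List (Int × List Int)) × (List (Int × Bool)) :=
  (1, [(1, [2, 3]), (2, [1]), (3, [])], [(3, true)])

def Spec_dfs (v : Int) (adj_list : List (Int × List Int)) (mem : List (Int × Bool)) (out : Int) : Prop := out = dfs_alt v adj_list mem
instance (v : Int) (adj_list : List (Int × List Int)) (mem : List (Int × Bool)) (out : Int) : Decidable (Spec_dfs v adj_list mem out) := by unfold Spec_dfs; infer_instance

-- ===== CLAIM (what is proved, stated in full; the proofs are below) =====
def Claim_equal_dfs : Prop := ∀ (v : Int) (adj_list : List (Int × List Int)) (mem : List (Int × Bool)), Dom_dfs v adj_list mem → Pre_dfs v adj_list mem → Spec_dfs v adj_list mem (dfs v adj_list mem)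

-- ===== LEMMAS AND PROOFS =====

-- Number of adjacency entries whose key is unvisited: A's fuel measure.
def Ucnt (adj : PySem.Dict Int (List Int)) (mem : PySem.Dict Int Bool) : Nat :=
  ((PySem.Dict.items adj).filter (fun p => (PySem.Dict.get? mem p.1).isNone)).length

-- Total neighbor-list length over unvisited keys: B's fuel measure.
def Wsum (adj : PySem.Dict Int (List Int)) (mem : PySem.Dict Int Bool) : Nat :=
  (((PySem.Dict.items adj).filter (fun p => (PySem.Dict.get? mem p.1).isNone)).map (fun p => p.2.length)).sum

-- "ideal" (fuel-independent) values, used only by the proofs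
def dfsAI (adj : PySem.Dict Int (List Int)) (v : Int) (mem : PySem.Dict Int Bool) : Int × PySem.Dict Int Bool :=
  dfsA adj (Ucnt adj mem + 1) v mem
def dfsALI (adj : PySem.Dict Int (List Int)) (ns : List Int) (acc : Int) (mem : PySem.Dict Int Bool) : Int × PySem.Dict Int Bool :=
  dfsAList adj (Ucnt adj mem + 1) ns acc mem
def loopI (adj : PySem.Dict Int (List Int)) (stack : List Int) (mem : PySem.Dict Int Bool) (total : Int) : Int :=
  loopB adj (stack.length + Wsum adj mem + 1) stack mem total

-- unfolding equations
theorem dfsA_zero (adj : PySem.Dict Int (List Int)) (v : Int) (mem : PySem.Dict Int Bool) :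
    dfsA adj 0 v mem = (0, mem) := by rw [dfsA]

theorem dfsA_succ (adj : PySem.Dict Int (List Int)) (f : Nat) (v : Int) (mem : PySem.Dict Int Bool) :
    dfsA adj (f + 1) v mem =
      if (PySem.Dict.get? mem v).isSome then (0, mem)
      else dfsAList adj f (PySem.Dict.getD adj v []) v (PySem.Dict.insert mem v true) := by rw [dfsA]

theorem dfsAList_nil (adj : PySem.Dict Int (List Int)) (f : Nat) (acc : Int) (mem : PySem.Dict Int Bool) :
    dfsAList adj f [] acc mem = (acc, mem) := by rw [dfsAList]

theorem dfsAList_cons (adj : PySem.Dict Int (List Int)) (f : Nat) (n : Int) (rest : List Int) (acc : Int) (mem : PySem.Dict Int Bool) :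
    dfsAList adj f (n :: rest) acc mem =
      dfsAList adj f rest (acc + (dfsA adj f n mem).1) (dfsA adj f n mem).2 := by rw [dfsAList]

theorem loopB_zero (adj : PySem.Dict Int (List Int)) (stack : List Int) (mem : PySem.Dict Int Bool) (t : Int) :
    loopB adj 0 stack mem t = t := by cases stack <;> rfl

theorem loopB_nil (adj : PySem.Dict Int (List Int)) (f : Nat) (mem : PySem.Dict Int Bool) (t : Int) :
    loopB adj (f + 1) [] mem t = t := rfl

theorem loopB_cons (adj : PySem.Dict Int (List Int)) (f : Nat) (node : Int) (rest : List Int) (mem : PySem.Dict Int Bool) (t : Int) :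
    loopB adj (f + 1) (node :: rest) mem t =
      if (PySem.Dict.get? mem node).isSome then loopB adj f rest mem t
      else loopB adj f (PySem.Dict.getD adj node [] ++ rest) (PySem.Dict.insert mem node true) (t + node) := rfl

-- generic list lemmas
theorem pv_filter_len_mono {a : Type} (l : List a) (p q : a -> Bool)
    (h : forall x, x ∈ l -> p x = true -> q x = true) :
    (l.filter p).length <= (l.filter q).length := by
  induction l with
  | nil => simp
  | cons a t ih =>
    have ht := ih (fun x hx hpx => h x (List.mem_cons_of_mem a hx) hpx)
    by_cases hp : p a = true
    · have hq : q a = true := h a (by simp) hp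
      simp [hp, hq]; omega
    · have hp' : p a = false := by revert hp; cases p a <;> simp
      by_cases hq : q a = true
      · simp [hp', hq]; omega
      · have hq' : q a = false := by revert hq; cases q a <;> simp
        simp [hp', hq']; omega

theorem pv_filter_map_sum_mono (l : List (Int × List Int)) (p q : (Int × List Int) -> Bool)
    (h : forall x, x ∈ l -> p x = true -> q x = true) :
    (((l.filter p).map (fun p => p.2.length)).sum) <= (((l.filter q).map (fun p => p.2.length)).sum) := by
  induction l with
  | nil => simp
  | cons a t ih =>
    have ht := ih (fun x hx hpx => h x (List.mem_cons_of_mem a hx) hpx)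
    by_cases hp : p a = true
    · have hq : q a = true := h a (by simp) hp
      simp [hp, hq]; omega
    · have hp' : p a = false := by revert hp; cases p a <;> simp
      by_cases hq : q a = true
      · simp [hp', hq]; omega
      · have hq' : q a = false := by revert hq; cases q a <;> simp
        simp [hp', hq']; omega

theorem pv_len_filter_and_lt (l : List (Int × List Int)) (q : (Int × List Int) -> Bool)
    (x : Int × List Int) (hx : x ∈ l) (hq : q x = true) :
    (l.filter (fun p => (!(p.1 == x.1)) && q p)).length < (l.filter q).length := by
  induction l with
  | nil => simp at hx
  | cons a t ih =>
    have hmono : (t.filter (fun p => (!(p.1 == x.1)) && q p)).length <= (t.filter q).length :=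
      pv_filter_len_mono t _ q (fun y _ hy => by simp at hy; exact hy.2)
    rcases List.mem_cons.mp hx with rfl | hxt
    · simp [hq]
      omega
    · by_cases hqa : q a = true
      · by_cases heq : (a.1 == x.1) = true
        · simp [hqa, heq]
          omega
        · have hne : (a.1 == x.1) = false := by revert heq; cases (a.1 == x.1) <;> simp
          simp [hqa, hne]
          exact ih hxt
      · have hqa' : q a = false := by revert hqa; cases q a <;> simp
        simp [hqa', Bool.and_false]
        exact ih hxt

theorem pv_sum_filter_and_le (l : List (Int × List Int)) (q : (Int × List Int) -> Bool)
    (x : Int × List Int) (hx : x ∈ l) (hq : q x = true) :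
    (((l.filter (fun p => (!(p.1 == x.1)) && q p)).map (fun p => p.2.length)).sum) + x.2.length
      <= ((l.filter q).map (fun p => p.2.length)).sum := by
  induction l with
  | nil => simp at hx
  | cons a t ih =>
    have hmono : (((t.filter (fun p => (!(p.1 == x.1)) && q p)).map (fun p => p.2.length)).sum)
        <= ((t.filter q).map (fun p => p.2.length)).sum :=
      pv_filter_map_sum_mono t _ q (fun y _ hy => by simp at hy; exact hy.2)
    rcases List.mem_cons.mp hx with rfl | hxt
    · simp [hq]
      omega
    · by_cases hqa : q a = true
      · by_cases heq : (a.1 == x.1) = true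
        · simp [hqa, heq]
          have := ih hxt
          omega
        · have hne : (a.1 == x.1) = false := by revert heq; cases (a.1 == x.1) <;> simp
          simp [hqa, hne]
          have := ih hxt
          omega
      · have hqa' : q a = false := by revert hqa; cases q a <;> simp
        simp [hqa', Bool.and_false]
        exact ih hxt

-- growth of the visited dict
theorem pv_keymono_insert (mem : PySem.Dict Int Bool) (v : Int) (b : Bool) (k : Int)
    (h : (PySem.Dict.get? mem k).isSome = true) :
    (PySem.Dict.get? (PySem.Dict.insert mem v b) k).isSome = true := by
  rw [PySem.Dict.get?_insert]
  split_ifs <;> simp_all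

theorem pv_U_le_of_keymono (adj : PySem.Dict Int (List Int)) (m1 m2 : PySem.Dict Int Bool)
    (h : forall k, (PySem.Dict.get? m1 k).isSome = true -> (PySem.Dict.get? m2 k).isSome = true) :
    Ucnt adj m2 <= Ucnt adj m1 := by
  unfold Ucnt
  apply pv_filter_len_mono
  intro x _ hx
  cases h1 : PySem.Dict.get? m1 x.1 with
  | none => simp
  | some b =>
    have h2 := h x.1 (by simp [h1])
    rw [Option.isNone_iff_eq_none] at hx
    simp [hx] at h2

theorem pv_W_le_of_keymono (adj : PySem.Dict Int (List Int)) (m1 m2 : PySem.Dict Int Bool)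
    (h : forall k, (PySem.Dict.get? m1 k).isSome = true -> (PySem.Dict.get? m2 k).isSome = true) :
    Wsum adj m2 <= Wsum adj m1 := by
  unfold Wsum
  apply pv_filter_map_sum_mono
  intro x _ hx
  cases h1 : PySem.Dict.get? m1 x.1 with
  | none => simp
  | some b =>
    have h2 := h x.1 (by simp [h1])
    rw [Option.isNone_iff_eq_none] at hx
    simp [hx] at h2

theorem pv_filter_insert_eq (adj : PySem.Dict Int (List Int)) (mem : PySem.Dict Int Bool) (v : Int) :
    (PySem.Dict.items adj).filter (fun p => (PySem.Dict.get? (PySem.Dict.insert mem v true) p.1).isNone)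
      = (PySem.Dict.items adj).filter (fun p => (!(p.1 == v)) && (PySem.Dict.get? mem p.1).isNone) := by
  apply List.filter_congr
  intro x _
  rw [PySem.Dict.get?_insert]
  by_cases hxv : x.1 = v
  · simp [hxv]
  · simp [hxv]

theorem pv_U_insert_lt (adj : PySem.Dict Int (List Int)) (mem : PySem.Dict Int Bool) (v : Int)
    (ns : List Int) (hv : PySem.Dict.get? adj v = some ns) (hu : PySem.Dict.get? mem v = none) :
    Ucnt adj (PySem.Dict.insert mem v true) < Ucnt adj mem := by
  unfold Ucnt
  rw [pv_filter_insert_eq]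
  exact pv_len_filter_and_lt _ _ (v, ns) (PySem.Dict.mem_items_of_get?_eq_some adj hv) (by simp [hu])

theorem pv_W_insert_le (adj : PySem.Dict Int (List Int)) (mem : PySem.Dict Int Bool) (v : Int)
    (ns : List Int) (hv : PySem.Dict.get? adj v = some ns) (hu : PySem.Dict.get? mem v = none) :
    Wsum adj (PySem.Dict.insert mem v true) + ns.length <= Wsum adj mem := by
  unfold Wsum
  rw [pv_filter_insert_eq]
  exact pv_sum_filter_and_le _ _ (v, ns) (PySem.Dict.mem_items_of_get?_eq_some adj hv) (by simp [hu])

theorem pv_U_pos (adj : PySem.Dict Int (List Int)) (mem : PySem.Dict Int Bool) (v : Int)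
    (ns : List Int) (hv : PySem.Dict.get? adj v = some ns) (hu : PySem.Dict.get? mem v = none) :
    1 <= Ucnt adj mem := by
  unfold Ucnt
  have hx : (v, ns) ∈ (PySem.Dict.items adj).filter (fun p => (PySem.Dict.get? mem p.1).isNone) :=
    List.mem_filter.mpr ⟨PySem.Dict.mem_items_of_get?_eq_some adj hv, by simp [hu]⟩
  have := List.length_pos_of_mem hx
  omega

theorem pv_not_isSome_none {b : Type} (o : Option b) (h : ¬ (o.isSome = true)) : o = none := by
  cases o <;> simp_all

-- combined bound for B's step
theorem pv_key_bound (adj : PySem.Dict Int (List Int)) (mem : PySem.Dict Int Bool) (v : Int)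
    (hu : PySem.Dict.get? mem v = none) :
    (PySem.Dict.getD adj v []).length + Wsum adj (PySem.Dict.insert mem v true) <= Wsum adj mem := by
  cases hadj : PySem.Dict.get? adj v with
  | none =>
    rw [PySem.Dict.getD_of_get?_eq_none adj [] hadj]
    have := pv_W_le_of_keymono adj mem (PySem.Dict.insert mem v true) (fun k hk => pv_keymono_insert mem v true k hk)
    simp
    omega
  | some ns =>
    rw [PySem.Dict.getD_of_get?_eq_some adj [] hadj]
    have := pv_W_insert_le adj mem v ns hadj hu
    omega

-- A only adds keys to mem
theorem pv_monoA (adj : PySem.Dict Int (List Int)) :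
    forall f : Nat,
      (forall v mem k, (PySem.Dict.get? mem k).isSome = true ->
        (PySem.Dict.get? (dfsA adj f v mem).2 k).isSome = true) ∧
      (forall ns acc mem k, (PySem.Dict.get? mem k).isSome = true ->
        (PySem.Dict.get? (dfsAList adj f ns acc mem).2 k).isSome = true) := by
  intro f
  induction f with
  | zero =>
    have hA : forall v mem k, (PySem.Dict.get? mem k).isSome = true ->
        (PySem.Dict.get? (dfsA adj 0 v mem).2 k).isSome = true := by
      intro v mem k h; rw [dfsA_zero]; exact h
    refine ⟨hA, ?_⟩
    intro ns
    induction ns with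
    | nil => intro acc mem k h; rw [dfsAList_nil]; exact h
    | cons n rest ihn =>
      intro acc mem k h
      rw [dfsAList_cons]
      exact ihn _ _ _ (hA n mem k h)
  | succ f ih =>
    have hA : forall v mem k, (PySem.Dict.get? mem k).isSome = true ->
        (PySem.Dict.get? (dfsA adj (f + 1) v mem).2 k).isSome = true := by
      intro v mem k h
      rw [dfsA_succ]
      by_cases hv : (PySem.Dict.get? mem v).isSome = true
      · simp only [hv, if_true]; exact h
      · simp only [hv, Bool.false_eq_true, if_false]
        exact ih.2 _ _ _ _ (pv_keymono_insert mem v true k h)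
    refine ⟨hA, ?_⟩
    intro ns
    induction ns with
    | nil => intro acc mem k h; rw [dfsAList_nil]; exact h
    | cons n rest ihn =>
      intro acc mem k h
      rw [dfsAList_cons]
      exact ihn _ _ _ (hA n mem k h)

-- fuel stability for A
theorem pv_stabA (adj : PySem.Dict Int (List Int)) :
    forall f : Nat,
      (forall v mem, Ucnt adj mem < f -> dfsA adj f v mem = dfsA adj (f + 1) v mem) ∧
      (forall ns acc mem, Ucnt adj mem < f -> dfsAList adj f ns acc mem = dfsAList adj (f + 1) ns acc mem) := by
  intro f
  induction f with
  | zero => exact ⟨fun v mem h => absurd h (Nat.not_lt_zero _), fun ns acc mem h => absurd h (Nat.not_lt_zero _)⟩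
  | succ f ih =>
    have hA : forall v mem, Ucnt adj mem < f + 1 -> dfsA adj (f + 1) v mem = dfsA adj (f + 2) v mem := by
      intro v mem h
      rw [dfsA_succ, dfsA_succ]
      by_cases hv : (PySem.Dict.get? mem v).isSome = true
      · simp [hv]
      · simp only [hv, Bool.false_eq_true, if_false]
        have hnone : PySem.Dict.get? mem v = none := pv_not_isSome_none _ hv
        cases hadj : PySem.Dict.get? adj v with
        | none =>
          rw [PySem.Dict.getD_of_get?_eq_none adj [] hadj, dfsAList_nil, dfsAList_nil]
        | some ns =>
          apply ih.2
          have := pv_U_insert_lt adj mem v ns hadj hnone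
          omega
    refine ⟨hA, ?_⟩
    intro ns
    induction ns with
    | nil => intro acc mem h; rw [dfsAList_nil, dfsAList_nil]
    | cons n rest ihn =>
      intro acc mem h
      rw [dfsAList_cons, dfsAList_cons]
      rw [← hA n mem h]
      have hle : Ucnt adj (dfsA adj (f + 1) n mem).2 <= Ucnt adj mem :=
        pv_U_le_of_keymono adj mem _ (fun k hk => (pv_monoA adj (f + 1)).1 n mem k hk)
      exact ihn _ _ (by omega)

theorem pv_fixA (adj : PySem.Dict Int (List Int)) (v : Int) (mem : PySem.Dict Int Bool) :
    forall f : Nat, Ucnt adj mem < f -> dfsA adj f v mem = dfsAI adj v mem := by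
  intro f
  induction f with
  | zero => intro h; exact absurd h (Nat.not_lt_zero _)
  | succ f ih =>
    intro h
    by_cases h2 : Ucnt adj mem < f
    · rw [← (pv_stabA adj f).1 v mem h2]
      exact ih h2
    · have hf : f = Ucnt adj mem := by omega
      subst hf
      rfl

theorem pv_fixAL (adj : PySem.Dict Int (List Int)) (ns : List Int) (acc : Int) (mem : PySem.Dict Int Bool) :
    forall f : Nat, Ucnt adj mem < f -> dfsAList adj f ns acc mem = dfsALI adj ns acc mem := by
  intro f
  induction f with
  | zero => intro h; exact absurd h (Nat.not_lt_zero _)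
  | succ f ih =>
    intro h
    by_cases h2 : Ucnt adj mem < f
    · rw [← (pv_stabA adj f).2 ns acc mem h2]
      exact ih h2
    · have hf : f = Ucnt adj mem := by omega
      subst hf
      rfl

theorem pv_monoAI (adj : PySem.Dict Int (List Int)) (v : Int) (mem : PySem.Dict Int Bool) (k : Int)
    (h : (PySem.Dict.get? mem k).isSome = true) :
    (PySem.Dict.get? (dfsAI adj v mem).2 k).isSome = true :=
  (pv_monoA adj _).1 v mem k h

-- recurrences of the ideal values
theorem pv_R1 (adj : PySem.Dict Int (List Int)) (v : Int) (mem : PySem.Dict Int Bool) :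
    dfsAI adj v mem =
      if (PySem.Dict.get? mem v).isSome then (0, mem)
      else dfsALI adj (PySem.Dict.getD adj v []) v (PySem.Dict.insert mem v true) := by
  unfold dfsAI
  rw [dfsA_succ]
  by_cases hv : (PySem.Dict.get? mem v).isSome = true
  · simp [hv]
  · simp only [hv, Bool.false_eq_true, if_false]
    have hnone : PySem.Dict.get? mem v = none := pv_not_isSome_none _ hv
    cases hadj : PySem.Dict.get? adj v with
    | none =>
      rw [PySem.Dict.getD_of_get?_eq_none adj [] hadj, dfsAList_nil]
      unfold dfsALI
      rw [dfsAList_nil]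
    | some ns =>
      apply pv_fixAL
      exact pv_U_insert_lt adj mem v ns hadj hnone

theorem pv_R2_nil (adj : PySem.Dict Int (List Int)) (acc : Int) (mem : PySem.Dict Int Bool) :
    dfsALI adj [] acc mem = (acc, mem) := by
  unfold dfsALI; rw [dfsAList_nil]

theorem pv_R2_cons (adj : PySem.Dict Int (List Int)) (n : Int) (ns : List Int) (acc : Int) (mem : PySem.Dict Int Bool) :
    dfsALI adj (n :: ns) acc mem =
      dfsALI adj ns (acc + (dfsAI adj n mem).1) (dfsAI adj n mem).2 := by
  unfold dfsALI dfsAI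
  rw [dfsAList_cons]
  apply pv_fixAL
  have hle : Ucnt adj (dfsA adj (Ucnt adj mem + 1) n mem).2 <= Ucnt adj mem :=
    pv_U_le_of_keymono adj mem _ (fun k hk => (pv_monoA adj _).1 n mem k hk)
  omega

theorem pv_accA (adj : PySem.Dict Int (List Int)) :
    forall (ns : List Int) (acc : Int) (mem : PySem.Dict Int Bool),
      dfsALI adj ns acc mem = (acc + (dfsALI adj ns 0 mem).1, (dfsALI adj ns 0 mem).2) := by
  intro ns
  induction ns with
  | nil => intro acc mem; rw [pv_R2_nil, pv_R2_nil]; simp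
  | cons n rest ih =>
    intro acc mem
    rw [pv_R2_cons, pv_R2_cons]
    rw [ih (acc + (dfsAI adj n mem).1), ih (0 + (dfsAI adj n mem).1)]
    apply Prod.ext
    · simp only []
      ring
    · rfl

-- fuel stability for B
theorem pv_stabB (adj : PySem.Dict Int (List Int)) :
    forall f : Nat, forall stack mem total, stack.length + Wsum adj mem <= f ->
      loopB adj f stack mem total = loopB adj (f + 1) stack mem total := by
  intro f
  induction f with
  | zero =>
    intro stack mem total h
    cases stack with
    | nil => rw [loopB_zero, loopB_nil]
    | cons a s => simp [List.length_cons] at h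
  | succ f ih =>
    intro stack mem total h
    cases stack with
    | nil => rw [loopB_nil, loopB_nil]
    | cons node rest =>
      rw [loopB_cons, loopB_cons]
      by_cases hv : (PySem.Dict.get? mem node).isSome = true
      · simp only [hv, if_true]
        apply ih
        simp [List.length_cons] at h
        omega
      · simp only [hv, Bool.false_eq_true, if_false]
        have hnone : PySem.Dict.get? mem node = none := pv_not_isSome_none _ hv
        apply ih
        have hb := pv_key_bound adj mem node hnone
        simp [List.length_cons, List.length_append] at h ⊢
        omega

theorem pv_fixB (adj : PySem.Dict Int (List Int)) (stack : List Int) (mem : PySem.Dict Int Bool) (total : Int) :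
    forall f : Nat, stack.length + Wsum adj mem < f -> loopB adj f stack mem total = loopI adj stack mem total := by
  intro f
  induction f with
  | zero => intro h; exact absurd h (Nat.not_lt_zero _)
  | succ f ih =>
    intro h
    by_cases h2 : stack.length + Wsum adj mem < f
    · rw [← pv_stabB adj f stack mem total (by omega)]
      exact ih h2
    · have hf : f = stack.length + Wsum adj mem := by omega
      subst hf
      rfl

theorem pv_RB_nil (adj : PySem.Dict Int (List Int)) (mem : PySem.Dict Int Bool) (total : Int) :
    loopI adj [] mem total = total := rfl

theorem pv_RB_cons (adj : PySem.Dict Int (List Int)) (v : Int) (S : List Int) (mem : PySem.Dict Int Bool) (total : Int) :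
    loopI adj (v :: S) mem total =
      if (PySem.Dict.get? mem v).isSome then loopI adj S mem total
      else loopI adj (PySem.Dict.getD adj v [] ++ S) (PySem.Dict.insert mem v true) (total + v) := by
  unfold loopI
  rw [show ((v :: S).length + Wsum adj mem + 1) = (S.length + Wsum adj mem + 1) + 1 by simp [List.length_cons]; omega]
  rw [loopB_cons]
  by_cases hv : (PySem.Dict.get? mem v).isSome = true
  · simp only [hv, if_true]
  · simp only [hv, Bool.false_eq_true, if_false]
    have hnone : PySem.Dict.get? mem v = none := pv_not_isSome_none _ hv
    apply pv_fixB
    have hb := pv_key_bound adj mem v hnone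
    simp [List.length_append]
    omega

-- the simulation: popping v computes dfsAI v and continues
theorem pv_simlist (adj : PySem.Dict Int (List Int)) (m : Nat)
    (IH : forall v S mem t, Ucnt adj mem <= m ->
      loopI adj (v :: S) mem t = loopI adj S (dfsAI adj v mem).2 (t + (dfsAI adj v mem).1)) :
    forall ns S mem t, Ucnt adj mem <= m ->
      loopI adj (ns ++ S) mem t = loopI adj S (dfsALI adj ns 0 mem).2 (t + (dfsALI adj ns 0 mem).1) := by
  intro ns
  induction ns with
  | nil =>
    intro S mem t h
    rw [List.nil_append, pv_R2_nil]
    simp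
  | cons n rest ih =>
    intro S mem t h
    rw [List.cons_append]
    rw [IH n (rest ++ S) mem t h]
    have hU' : Ucnt adj (dfsAI adj n mem).2 <= m := by
      have := pv_U_le_of_keymono adj mem (dfsAI adj n mem).2 (fun k hk => pv_monoAI adj n mem k hk)
      omega
    rw [ih S (dfsAI adj n mem).2 (t + (dfsAI adj n mem).1) hU']
    rw [pv_R2_cons, pv_accA adj rest (0 + (dfsAI adj n mem).1)]
    have harith : t + (dfsAI adj n mem).1 + (dfsALI adj rest 0 (dfsAI adj n mem).2).1
        = t + (0 + (dfsAI adj n mem).1 + (dfsALI adj rest 0 (dfsAI adj n mem).2).1) := by ring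
    rw [harith]

theorem pv_sim (adj : PySem.Dict Int (List Int)) :
    forall k : Nat, forall v S mem t, Ucnt adj mem <= k ->
      loopI adj (v :: S) mem t = loopI adj S (dfsAI adj v mem).2 (t + (dfsAI adj v mem).1) := by
  intro k
  induction k with
  | zero =>
    intro v S mem t hU
    rw [pv_RB_cons, pv_R1]
    by_cases hv : (PySem.Dict.get? mem v).isSome = true
    · simp [hv]
    · simp only [hv, Bool.false_eq_true, if_false]
      have hnone : PySem.Dict.get? mem v = none := pv_not_isSome_none _ hv
      cases hadj : PySem.Dict.get? adj v with
      | none =>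
        rw [PySem.Dict.getD_of_get?_eq_none adj [] hadj, List.nil_append, pv_R2_nil]
      | some ns =>
        have := pv_U_pos adj mem v ns hadj hnone
        omega
  | succ k ih =>
    intro v S mem t hU
    rw [pv_RB_cons, pv_R1]
    by_cases hv : (PySem.Dict.get? mem v).isSome = true
    · simp [hv]
    · simp only [hv, Bool.false_eq_true, if_false]
      have hnone : PySem.Dict.get? mem v = none := pv_not_isSome_none _ hv
      cases hadj : PySem.Dict.get? adj v with
      | none =>
        rw [PySem.Dict.getD_of_get?_eq_none adj [] hadj, List.nil_append, pv_R2_nil]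
      | some ns =>
        have hU1 : Ucnt adj (PySem.Dict.insert mem v true) <= k := by
          have := pv_U_insert_lt adj mem v ns hadj hnone
          omega
        rw [pv_simlist adj k ih (PySem.Dict.getD adj v []) S (PySem.Dict.insert mem v true) (t + v) hU1]
        rw [pv_accA adj (PySem.Dict.getD adj v []) v (PySem.Dict.insert mem v true)]
        have harith : t + v + (dfsALI adj (PySem.Dict.getD adj v []) 0 (PySem.Dict.insert mem v true)).1
            = t + (v + (dfsALI adj (PySem.Dict.getD adj v []) 0 (PySem.Dict.insert mem v true)).1) := by ring
        rw [harith]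

-- ===== VERDICT (by name: the statement is the Claim_ definition above) =====
theorem dfs_spec : Claim_equal_dfs := by
  intro v adj_list mem _hdom _hpre
  unfold Spec_dfs dfs dfs_alt
  have hitems : PySem.Dict.items (PySem.Dict.mk adj_list) = adj_list := rfl
  have hU : Ucnt (PySem.Dict.mk adj_list) (PySem.Dict.mk mem) <= adj_list.length := by
    unfold Ucnt
    rw [hitems]
    exact List.length_filter_le _ _
  have hW : Wsum (PySem.Dict.mk adj_list) (PySem.Dict.mk mem) <= (adj_list.map (fun p => p.2.length)).sum := by
    unfold Wsum
    rw [hitems]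
    have := pv_filter_map_sum_mono adj_list (fun p => (PySem.Dict.get? (PySem.Dict.mk mem) p.1).isNone) (fun _ => true) (fun x _ _ => rfl)
    simpa using this
  rw [pv_fixA (PySem.Dict.mk adj_list) v (PySem.Dict.mk mem) (adj_list.length + 1) (by omega)]
  rw [pv_fixB (PySem.Dict.mk adj_list) [v] (PySem.Dict.mk mem) 0 ((adj_list.map (fun p => p.2.length)).sum + 2) (by simp [List.length_cons]; omega)]
  rw [pv_sim (PySem.Dict.mk adj_list) (Ucnt (PySem.Dict.mk adj_list) (PySem.Dict.mk mem)) v [] (PySem.Dict.mk mem) 0 (le_refl _)]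
  rw [pv_RB_nil]
  simp
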